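-- pv_equiv track=rewrite | github.com/gonzadev2022/python-principiante | guia-5/ej10.py | sumando_horas
-- ===== SOURCE A (Python) =====
-- def agregar_cero(n):
--     if (len(str(n)) == 1): return "0" + str(n)
--     return n
--
-- def sumando_horas(h1, m1, s1, h2, m2, s2):
--
--     dia = 1
--
--     #Validaciones previas
--     if (h1 < 0 or h1 > 23 or h2 < 0 or h2 > 23): return "Hora no valida"
--     if (m1 < 0 or m1 > 59 or s2 < 0 or m2 > 59): return "Minutos no validos"
--     if (s1 < 0 or s1 > 59 or s2 < 0 or s2 > 59): return "Segundos no validos"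
--
--     #Todos los bucles se repiten hasta que ya no quede tiempo por sumar
--
--     #Segundos
--     while (s2 != 0):
--
--         if (s1 + s2 >= 60):
--             s2 -= 60 - s1
--             s1 = 0
--             m1 += 1
--
--         else:
--             s1 += s2
--             s2 -= s2
--
--     #Minutos
--     while (m2 != 0 or m1 == 60):
--
--         if (m1 + m2 >= 60):
--             m2 -= 60 - m1
--             m1 = 0
--             h1 += 1
--
--         else:
--             m1 += m2
--             m2 -= m2
--
--     #Horas
--     while (h2 != 0 or h1 == 24):
--
--         if (h1 + h2 >= 24):
--             h2 -= 24 - h1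
--             h1 = 0
--             dia += 1 #El dia cambia despues de transcurrir 24 hs
--
--         else:
--             h1 += h2
--             h2 -= h2
--
--     h1 = agregar_cero(h1)
--     m1 = agregar_cero(m1)
--     s1 = agregar_cero(s1)
--
--     return "Dia {}  {}:{}:{}".format(dia, h1, m1, s1)
-- ===== SOURCE B (Python) =====
-- def sumando_horas(h1, m1, s1, h2, m2, s2):
--     # same validation as the original (order and conditions preserved)
--     if (h1 < 0 or h1 > 23 or h2 < 0 or h2 > 23): return "Hora no valida"
--     if (m1 < 0 or m1 > 59 or s2 < 0 or m2 > 59): return "Minutos no validos"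
--     if (s1 < 0 or s1 > 59 or s2 < 0 or s2 > 59): return "Segundos no validos"
--
--     # direct single-step carry arithmetic instead of the three while-loops
--     t = s1 + s2
--     if t >= 60:
--         sec, cm = t - 60, 1
--     else:
--         sec, cm = t, 0
--     tm = m1 + cm + m2
--     if tm >= 60:
--         minu, ch = tm - 60, 1
--     else:
--         minu, ch = tm, 0
--     th = h1 + ch + h2
--     if th >= 24:
--         hour, dia = th - 24, 2
--     else:
--         hour, dia = th, 1
--
--     def pad(n):
--         return "0" + str(n) if 0 <= n <= 9 else str(n)
--
--     return "Dia {}  {}:{}:{}".format(dia, pad(hour), pad(minu), pad(sec))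
-- ===== Notes on version B (the rewrite author's own statement) =====
-- stated objective: simpler
-- what changed: Replaces A's three carry while-loops with direct single-step carry arithmetic (add, compare to the modulus, subtract once and bump the next unit), keeping the original validation and output format unchanged.
import Mathlib
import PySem

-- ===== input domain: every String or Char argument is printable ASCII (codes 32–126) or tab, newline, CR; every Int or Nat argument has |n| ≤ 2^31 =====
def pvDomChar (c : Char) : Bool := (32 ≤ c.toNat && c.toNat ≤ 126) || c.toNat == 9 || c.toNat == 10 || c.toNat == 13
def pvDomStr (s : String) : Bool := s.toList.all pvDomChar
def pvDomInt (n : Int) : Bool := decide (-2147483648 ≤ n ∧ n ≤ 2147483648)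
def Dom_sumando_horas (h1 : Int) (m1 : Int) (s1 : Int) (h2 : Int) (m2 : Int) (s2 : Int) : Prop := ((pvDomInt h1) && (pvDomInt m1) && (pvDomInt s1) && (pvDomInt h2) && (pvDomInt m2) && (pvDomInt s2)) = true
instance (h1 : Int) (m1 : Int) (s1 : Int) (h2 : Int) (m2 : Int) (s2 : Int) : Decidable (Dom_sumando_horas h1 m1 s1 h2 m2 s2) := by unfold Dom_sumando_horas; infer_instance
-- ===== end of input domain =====

-- B replaces the three carry while-loops of A by direct single-step carry arithmetic
-- (objective: simpler); validation and output format are unchanged.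

-- ===== PORT A =====
-- agregar_cero returns "0"+str(n) or the int n; both are then put through format,
-- so the port returns the String that ends up in the formatted output (exact).
def agregar_cero (n : Int) : String :=
  if PySem.Str.len (PySem.Int.toStr n) = 1 then "0" ++ PySem.Int.toStr n
  else PySem.Int.toStr n

-- while (s2 != 0): … — fuel-bounded transcription; 4 fuel covers every run the
-- validated inputs can reach (the loop body executes at most twice).
def pvSecLoop : Nat → Int → Int → Int → Int × Int
  | 0, s1, _, m1 => (s1, m1)
  | f + 1, s1, s2, m1 =>
    if s2 ≠ 0 then
      if s1 + s2 ≥ 60 then pvSecLoop f 0 (s2 - (60 - s1)) (m1 + 1)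
      else pvSecLoop f (s1 + s2) (s2 - s2) m1
    else (s1, m1)

-- while (m2 != 0 or m1 == 60): …
def pvMinLoop : Nat → Int → Int → Int → Int × Int
  | 0, m1, _, h1 => (m1, h1)
  | f + 1, m1, m2, h1 =>
    if m2 ≠ 0 ∨ m1 = 60 then
      if m1 + m2 ≥ 60 then pvMinLoop f 0 (m2 - (60 - m1)) (h1 + 1)
      else pvMinLoop f (m1 + m2) (m2 - m2) h1
    else (m1, h1)

-- while (h2 != 0 or h1 == 24): …
def pvHourLoop : Nat → Int → Int → Int → Int × Int
  | 0, h1, _, dia => (h1, dia)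
  | f + 1, h1, h2, dia =>
    if h2 ≠ 0 ∨ h1 = 24 then
      if h1 + h2 ≥ 24 then pvHourLoop f 0 (h2 - (24 - h1)) (dia + 1)
      else pvHourLoop f (h1 + h2) (h2 - h2) dia
    else (h1, dia)

def sumando_horas (h1 : Int) (m1 : Int) (s1 : Int) (h2 : Int) (m2 : Int) (s2 : Int) : String :=
  let dia : Int := 1
  if h1 < 0 ∨ h1 > 23 ∨ h2 < 0 ∨ h2 > 23 then "Hora no valida"
  else if m1 < 0 ∨ m1 > 59 ∨ s2 < 0 ∨ m2 > 59 then "Minutos no validos"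
  else if s1 < 0 ∨ s1 > 59 ∨ s2 < 0 ∨ s2 > 59 then "Segundos no validos"
  else
    let p1 := pvSecLoop 4 s1 s2 m1
    let p2 := pvMinLoop 4 p1.2 m2 h1
    let p3 := pvHourLoop 4 p2.2 h2 dia
    "Dia " ++ PySem.Int.toStr p3.2 ++ "  " ++ agregar_cero p3.1 ++ ":" ++
      agregar_cero p2.1 ++ ":" ++ agregar_cero p1.1

-- ===== PORT B =====
def pvPad (n : Int) : String :=
  if 0 ≤ n ∧ n ≤ 9 then "0" ++ PySem.Int.toStr n else PySem.Int.toStr n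

def sumando_horas_alt (h1 : Int) (m1 : Int) (s1 : Int) (h2 : Int) (m2 : Int) (s2 : Int) : String :=
  if h1 < 0 ∨ h1 > 23 ∨ h2 < 0 ∨ h2 > 23 then "Hora no valida"
  else if m1 < 0 ∨ m1 > 59 ∨ s2 < 0 ∨ m2 > 59 then "Minutos no validos"
  else if s1 < 0 ∨ s1 > 59 ∨ s2 < 0 ∨ s2 > 59 then "Segundos no validos"
  else
    let t := s1 + s2
    let sc := if t ≥ 60 then (t - 60, (1 : Int)) else (t, 0)
    let tm := m1 + sc.2 + m2
    let mc := if tm ≥ 60 then (tm - 60, (1 : Int)) else (tm, 0)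
    let th := h1 + mc.2 + h2
    let hd := if th ≥ 24 then (th - 24, (2 : Int)) else (th, 1)
    "Dia " ++ PySem.Int.toStr hd.2 ++ "  " ++ pvPad hd.1 ++ ":" ++
      pvPad mc.1 ++ ":" ++ pvPad sc.1

-- ===== PRECONDITION & SPEC =====
def Spec_sumando_horas (h1 : Int) (m1 : Int) (s1 : Int) (h2 : Int) (m2 : Int) (s2 : Int) (out : String) : Prop := out = sumando_horas_alt h1 m1 s1 h2 m2 s2
instance (h1 : Int) (m1 : Int) (s1 : Int) (h2 : Int) (m2 : Int) (s2 : Int) (out : String) : Decidable (Spec_sumando_horas h1 m1 s1 h2 m2 s2 out) := by unfold Spec_sumando_horas; infer_instance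

-- ===== CLAIM (what is proved, stated in full; the proofs are below) =====
def Claim_equal_sumando_horas : Prop := ∀ (h1 : Int) (m1 : Int) (s1 : Int) (h2 : Int) (m2 : Int) (s2 : Int), Dom_sumando_horas h1 m1 s1 h2 m2 s2 → Spec_sumando_horas h1 m1 s1 h2 m2 s2 (sumando_horas h1 m1 s1 h2 m2 s2)

-- ===== LEMMAS AND PROOFS =====

-- Nat.toDigits 10 has length 1 exactly on single-digit numbers.
lemma pv_toDigits_len_pos (f n : Nat) (hf : 0 < f) : 0 < (Nat.toDigitsCore 10 f n []).length := by
  cases f with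
  | zero => omega
  | succ f =>
    simp only [Nat.toDigitsCore]
    split
    · simp
    · rw [Nat.toDigitsCore_lens_eq]; omega

lemma pv_toDigits_len_one_iff (n : Nat) : (Nat.toDigits 10 n).length = 1 ↔ n < 10 := by
  constructor
  · intro h
    by_contra hn
    push_neg at hn
    have h10 : n / 10 ≠ 0 := by omega
    simp only [Nat.toDigits, Nat.toDigitsCore, h10, if_false] at h
    rw [Nat.toDigitsCore_lens_eq] at h
    have := pv_toDigits_len_pos n (n / 10) (by omega)
    omega
  · intro h
    have h10 : n / 10 = 0 := by omega
    simp [Nat.toDigits, Nat.toDigitsCore, h10]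

lemma pv_len_toStr_one_iff (n : Int) : PySem.Str.len (PySem.Int.toStr n) = 1 ↔ 0 ≤ n ∧ n ≤ 9 := by
  rw [PySem.Str.len_eq]
  unfold PySem.Int.toStr PySem.Int.toChars
  split
  · rename_i hneg
    have hp := pv_toDigits_len_pos (n.natAbs + 1) n.natAbs (by omega)
    simp only [Nat.toDigits] at hp
    simp only [String.toList_ofList, List.length_cons, Nat.toDigits]
    constructor
    · intro h; omega
    · intro h; omega
  · rename_i hneg
    push_neg at hneg
    simp only [String.toList_ofList]
    rw [show ((1 : Int) = ((1 : Nat) : Int)) by norm_num, Int.natCast_inj,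
      pv_toDigits_len_one_iff]
    omega

lemma pv_pad_eq (n : Int) : agregar_cero n = pvPad n := by
  unfold agregar_cero pvPad
  by_cases h : 0 ≤ n ∧ n ≤ 9
  · rw [if_pos ((pv_len_toStr_one_iff n).mpr h), if_pos h]
  · rw [if_neg (fun hc => h ((pv_len_toStr_one_iff n).mp hc)), if_neg h]

set_option maxHeartbeats 1000000 in
lemma pv_sec_closed (s1 s2 m1 : Int) (hs1 : 0 ≤ s1) (hs1' : s1 ≤ 59)
    (hs2 : 0 ≤ s2) (hs2' : s2 ≤ 59) :
    pvSecLoop 4 s1 s2 m1 = if s1 + s2 ≥ 60 then (s1 + s2 - 60, m1 + 1) else (s1 + s2, m1) := by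
  simp only [pvSecLoop]
  split_ifs <;> simp only [Prod.mk.injEq, and_true, true_and] <;> omega

set_option maxHeartbeats 1000000 in
lemma pv_min_closed (m1 m2 h1 : Int) (hm1 : 0 ≤ m1) (hm1' : m1 ≤ 60) (hm2' : m2 ≤ 59) :
    pvMinLoop 4 m1 m2 h1 = if m1 + m2 ≥ 60 then (m1 + m2 - 60, h1 + 1) else (m1 + m2, h1) := by
  simp only [pvMinLoop]
  split_ifs <;> simp only [Prod.mk.injEq, and_true, true_and] <;> omega

set_option maxHeartbeats 1000000 in
lemma pv_hour_closed (h1 h2 dia : Int) (hh1 : 0 ≤ h1) (hh1' : h1 ≤ 24)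
    (hh2 : 0 ≤ h2) (hh2' : h2 ≤ 23) :
    pvHourLoop 4 h1 h2 dia = if h1 + h2 ≥ 24 then (h1 + h2 - 24, dia + 1) else (h1 + h2, dia) := by
  simp only [pvHourLoop]
  split_ifs <;> simp only [Prod.mk.injEq, and_true, true_and] <;> omega

-- ===== VERDICT (by name: the statement is the Claim_ definition above) =====
theorem sumando_horas_spec : Claim_equal_sumando_horas := by
  intro h1 m1 s1 h2 m2 s2 _
  unfold Spec_sumando_horas sumando_horas sumando_horas_alt
  by_cases v1 : h1 < 0 ∨ h1 > 23 ∨ h2 < 0 ∨ h2 > 23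
  · simp only [if_pos v1]
  · rw [if_neg v1, if_neg v1]
    by_cases v2 : m1 < 0 ∨ m1 > 59 ∨ s2 < 0 ∨ m2 > 59
    · rw [if_pos v2, if_pos v2]
    · rw [if_neg v2, if_neg v2]
      by_cases v3 : s1 < 0 ∨ s1 > 59 ∨ s2 < 0 ∨ s2 > 59
      · rw [if_pos v3, if_pos v3]
      · rw [if_neg v3, if_neg v3]
        push_neg at v1 v2 v3
        obtain ⟨hh1, hh1', hh2, hh2'⟩ := v1
        obtain ⟨hm1, hm1', hs2a, hm2'⟩ := v2
        obtain ⟨hs1, hs1', _, hs2'⟩ := v3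
        simp only [pv_sec_closed s1 s2 m1 hs1 hs1' hs2a hs2', ge_iff_le, add_zero]
        by_cases c1 : (60:Int) ≤ s1 + s2
        · simp only [if_pos c1, add_zero]; try dsimp only
          simp only [pv_min_closed (m1 + 1) m2 h1 (by omega) (by omega) hm2', ge_iff_le, add_zero]
          by_cases c2 : (60:Int) ≤ m1 + 1 + m2
          · simp only [if_pos c2, add_zero]; try dsimp only
            simp only [pv_hour_closed (h1 + 1) h2 1 (by omega) (by omega) hh2 hh2', ge_iff_le, add_zero]
            by_cases c3 : (24:Int) ≤ h1 + 1 + h2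
            · simp only [if_pos c3, add_zero, pv_pad_eq]; try norm_num
            · simp only [if_neg c3, add_zero, pv_pad_eq]; try norm_num
          · simp only [if_neg c2, add_zero]; try dsimp only
            simp only [pv_hour_closed h1 h2 1 hh1 (by omega) hh2 hh2', ge_iff_le, add_zero]
            by_cases c3 : (24:Int) ≤ h1 + h2
            · simp only [if_pos c3, add_zero, pv_pad_eq]; try norm_num
            · simp only [if_neg c3, add_zero, pv_pad_eq]; try norm_num
        · simp only [if_neg c1, add_zero]; try dsimp only
          simp only [pv_min_closed m1 m2 h1 hm1 (by omega) hm2', ge_iff_le, add_zero]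
          by_cases c2 : (60:Int) ≤ m1 + m2
          · simp only [if_pos c2, add_zero]; try dsimp only
            simp only [pv_hour_closed (h1 + 1) h2 1 (by omega) (by omega) hh2 hh2', ge_iff_le, add_zero]
            by_cases c3 : (24:Int) ≤ h1 + 1 + h2
            · simp only [if_pos c3, add_zero, pv_pad_eq]; try norm_num
            · simp only [if_neg c3, add_zero, pv_pad_eq]; try norm_num
          · simp only [if_neg c2, add_zero]; try dsimp only
            simp only [pv_hour_closed h1 h2 1 hh1 (by omega) hh2 hh2', ge_iff_le, add_zero]
            by_cases c3 : (24:Int) ≤ h1 + h2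
            · simp only [if_pos c3, add_zero, pv_pad_eq]; try norm_num
            · simp only [if_neg c3, add_zero, pv_pad_eq]; try norm_num
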